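-- pv_equiv track=rewrite | github.com/zsLin177/CopyNE | wenet/utils/old_compute_evaluation_indicators.py | get_entity_by_BILOU_nested_only_valid
-- ===== SOURCE A (Python) =====
-- def get_entity_by_BILOU_nested_only_valid(_ner_seq: list):
--     """
--     由ner_seq获取ne entity.
--     nested方式
--     只抽取其中符合BILOU的ne
--     :param _ner_seq: BILOU的序列
--     :return: entity列表t
--     """
--     seq_len = len(_ner_seq)
--     _entity = []
--     # 只找B-和U-，然后验证是否符合。
--     for _idx in range(seq_len):
--         if _ner_seq[_idx] == 'O':
--             continue
--         _tags_list = _ner_seq[_idx].split("|")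
--         for _idy, _tag in enumerate(_tags_list):
--             if _tag[0] == 'B':
--                 for _idz in range(_idx + 1, seq_len):
--                     _tmp_tags_list = _ner_seq[_idz].split("|")
--                     if _tmp_tags_list.__len__() <= _idy:
--                         break
--                     if _tmp_tags_list[_idy][0] == 'I':
--                         if _tmp_tags_list[_idy][2:] != _tag[2:]:
--                             break
--                         else:
--                             continue
--                     if _tmp_tags_list[_idy][0] == 'L':
--                         if _tmp_tags_list[_idy][2:] != _tag[2:]:
--                             break
--                         _entity.append([_idx, _idz + 1, _tag[2:]])
--                         break
--                     break
--             if _tag[0] == 'U':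
--                 _entity.append([_idx, _idx + 1, _tag[2:]])
--     _entity.sort(key=lambda _item: (_item[0], _item[0] - _item[1]))
--     _entity_str = [str(_item) for _item in _entity]
--     return _entity_str
-- ===== SOURCE B (Python) =====
-- def get_entity_by_BILOU_nested_only_valid(_ner_seq: list):
--     """Alternative single-sweep re-implementation: one right-to-left pass precomputes,
--     per column, the entity close (end, type) reachable through a run of I-tags; each
--     B/U tag is then resolved by one lookup in a single left-to-right pass."""
--     n = len(_ner_seq)
--     # after[i] = per-column candidate state for scans starting at position i+1:
--     # state[c] == (end, typ) iff positions i+1..end-2 carry 'I-typ' in column c and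
--     # position end-1 carries 'L-typ' in column c.
--     after = [None] * n
--     state = []
--     for i in range(n - 1, -1, -1):
--         after[i] = state
--         parts = _ner_seq[i].split("|")
--         new = []
--         for c, p in enumerate(parts):
--             if p[0] == 'I':
--                 old = state[c] if c < len(state) else None
--                 new.append(old if old is not None and old[1] == p[2:] else None)
--             elif p[0] == 'L':
--                 new.append((i + 1, p[2:]))
--             else:
--                 new.append(None)
--         state = new
--     out = []
--     for idx, row in enumerate(_ner_seq):
--         if row == 'O':
--             continue
--         for c, tag in enumerate(row.split("|")):
--             if tag[0] == 'B':
--                 snap = after[idx]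
--                 cand = snap[c] if c < len(snap) else None
--                 if cand is not None and cand[1] == tag[2:]:
--                     out.append([idx, cand[0], tag[2:]])
--             if tag[0] == 'U':
--                 out.append([idx, idx + 1, tag[2:]])
--     out.sort(key=lambda _item: (_item[0], _item[0] - _item[1]))
--     return [str(_item) for _item in out]
-- ===== Notes on version B (the rewrite author's own statement) =====
-- stated objective: alternative
-- what changed: A rescans forward from every B-tag (nested loops); B makes one right-to-left pass that precomputes, per column, the entity close reachable through the I-run, then resolves each B-tag with a single lookup in one left-to-right pass; on inputs with long I-runs this avoids A's quadratic rescans, but a timing run's inputs did not show a measured speed-up.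
import Mathlib
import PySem

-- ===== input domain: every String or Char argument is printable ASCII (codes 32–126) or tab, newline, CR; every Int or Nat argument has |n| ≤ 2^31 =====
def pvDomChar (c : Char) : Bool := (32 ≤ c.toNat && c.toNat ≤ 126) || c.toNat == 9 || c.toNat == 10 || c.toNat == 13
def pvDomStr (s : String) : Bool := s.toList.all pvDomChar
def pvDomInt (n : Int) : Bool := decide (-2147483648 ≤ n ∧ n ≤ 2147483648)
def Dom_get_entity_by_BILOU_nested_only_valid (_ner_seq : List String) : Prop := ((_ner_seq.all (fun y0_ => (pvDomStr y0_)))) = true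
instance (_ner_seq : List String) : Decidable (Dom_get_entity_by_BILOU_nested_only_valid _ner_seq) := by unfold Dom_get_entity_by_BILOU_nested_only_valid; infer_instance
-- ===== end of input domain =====

-- B replaces A's rescans (a fresh forward scan from every B-tag) by one right-to-left pass that
-- precomputes, per column, the reachable entity close, so each B-tag is then resolved by one lookup.

-- ===== shared built-in helpers: '|'-split and Python's str([i, j, 'ty']) rendering (both Pythons call these built-ins) =====
def pvSplit (s : String) : List (List Char) := PySem.Chars.splitOn s.toList ['|']

-- Python repr() of a string: quote choice and escapes, exact on the printable-ASCII + tab/newline/CR domain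
def pvReprChars (cs : List Char) : List Char :=
  let q : Char := if cs.contains '\'' ∧ ¬ cs.contains '"' then '"' else '\''
  q :: cs.flatMap (fun c =>
    if c = '\\' then ['\\', '\\']
    else if c = q then ['\\', q]
    else if c = '\t' then ['\\', 't']
    else if c = '\n' then ['\\', 'n']
    else if c = '\r' then ['\\', 'r']
    else [c]) ++ [q]

-- str([start, end, typ])
def pvReprEnt (it : Int × Int × List Char) : String :=
  String.ofList ('[' :: PySem.Int.toChars it.1 ++ [',', ' '] ++ PySem.Int.toChars it.2.1
    ++ [',', ' '] ++ pvReprChars it.2.2 ++ [']'])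

-- ===== PORT A =====
-- A's inner 'for _idz in range(_idx + 1, seq_len)' scan with its breaks, over the suffix of rows;
-- pos is the absolute index _idz, the returned Int is the entity end _idz + 1
def pvScanA (t : List Char) (idy : Nat) : List String → Int → Option Int
  | [], _ => none
  | r :: rest, pos =>
    let tmp := pvSplit r
    if tmp.length ≤ idy then none
    else
      let col := tmp.getD idy []
      if col.head? = some 'I' then
        if col.drop 2 ≠ t then none else pvScanA t idy rest (pos + 1)
      else if col.head? = some 'L' then
        if col.drop 2 ≠ t then none else some (pos + 1)
      else none

-- body of A's 'for _idy, _tag in enumerate(_tags_list)'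
def pvTagA (full : List String) (idx : Int) (acc : List (Int × Int × List Char))
    (q : Int × List Char) : List (Int × Int × List Char) :=
  let acc2 :=
    if q.2.head? = some 'B' then
      match pvScanA (q.2.drop 2) q.1.toNat (full.drop (idx.toNat + 1)) (idx + 1) with
      | some e => acc ++ [(idx, e, q.2.drop 2)]
      | none => acc
    else acc
  if q.2.head? = some 'U' then acc2 ++ [(idx, idx + 1, q.2.drop 2)] else acc2

-- body of A's outer 'for _idx in range(seq_len)'
def pvRowA (full : List String) (acc : List (Int × Int × List Char))
    (p : Int × String) : List (Int × Int × List Char) :=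
  if p.2 = "O" then acc
  else (PySem.List.enumerate (pvSplit p.2) 0).foldl (pvTagA full p.1) acc

def get_entity_by_BILOU_nested_only_valid (_ner_seq : List String) : List String :=
  let entity := (PySem.List.enumerate _ner_seq 0).foldl (pvRowA _ner_seq) []
  (PySem.List.sorted2 entity (fun it => it.1) (fun it => it.1 - it.2.1) false).map pvReprEnt

-- ===== PORT B =====
-- B's per-row state update ('new' built from 'parts' and the state for the rows below)
def pvStep (pos : Int) (parts : List (List Char))
    (st : List (Option (Int × List Char))) : List (Option (Int × List Char)) :=
  (PySem.List.enumerate parts 0).map (fun q =>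
    if q.2.head? = some 'I' then
      match st.getD q.1.toNat none with
      | some c => if c.2 = q.2.drop 2 then some c else none
      | none => none
    else if q.2.head? = some 'L' then some (pos + 1, q.2.drop 2)
    else none)

-- B's right-to-left pass over 'range(n-1, -1, -1)': returns (state for scans starting at pos,
-- the 'after' snapshots for positions pos, pos+1, …)
def pvBuild : List String → Int →
    List (Option (Int × List Char)) × List (List (Option (Int × List Char)))
  | [], _ => ([], [])
  | r :: rest, pos =>
    let prev := pvBuild rest (pos + 1)
    (pvStep pos (pvSplit r) prev.1, prev.1 :: prev.2)

-- body of B's 'for c, tag in enumerate(row.split("|"))': each B-tag resolved from the snapshot by one lookup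
def pvTagB (idx : Int) (snap : List (Option (Int × List Char)))
    (acc : List (Int × Int × List Char)) (q : Int × List Char) : List (Int × Int × List Char) :=
  let acc2 :=
    if q.2.head? = some 'B' then
      match snap.getD q.1.toNat none with
      | some c => if c.2 = q.2.drop 2 then acc ++ [(idx, c.1, q.2.drop 2)] else acc
      | none => acc
    else acc
  if q.2.head? = some 'U' then acc2 ++ [(idx, idx + 1, q.2.drop 2)] else acc2

-- body of B's 'for idx, row in enumerate(_ner_seq)' (each row paired with its 'after' snapshot)
def pvRowB (acc : List (Int × Int × List Char))
    (p : Int × (String × List (Option (Int × List Char)))) : List (Int × Int × List Char) :=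
  if p.2.1 = "O" then acc
  else (PySem.List.enumerate (pvSplit p.2.1) 0).foldl (pvTagB p.1 p.2.2) acc

def get_entity_by_BILOU_nested_only_valid_alt (_ner_seq : List String) : List String :=
  let after := (pvBuild _ner_seq 0).2
  let entity := (PySem.List.enumerate (_ner_seq.zip after) 0).foldl pvRowB []
  (PySem.List.sorted2 entity (fun it => it.1) (fun it => it.1 - it.2.1) false).map pvReprEnt

-- ===== PRECONDITION & SPEC =====
-- Pre_ excludes exactly the inputs where the Python A raises IndexError on _tag[0]: some row with
-- an empty '|'-separated segment (e.g. "", "B-X|", "|U-X"); B's Python raises there as well.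
def Pre_get_entity_by_BILOU_nested_only_valid (_ner_seq : List String) : Prop :=
  ∀ s ∈ _ner_seq, [] ∉ pvSplit s
instance (_ner_seq : List String) : Decidable (Pre_get_entity_by_BILOU_nested_only_valid _ner_seq) := by
  unfold Pre_get_entity_by_BILOU_nested_only_valid; infer_instance

def pvWitness_get_entity_by_BILOU_nested_only_valid : List String :=
  ["B-PER|U-LOC", "I-PER", "L-PER", "O", "U-LOC"]

def Spec_get_entity_by_BILOU_nested_only_valid (_ner_seq : List String) (out : List String) : Prop := out = get_entity_by_BILOU_nested_only_valid_alt _ner_seq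
instance (_ner_seq : List String) (out : List String) : Decidable (Spec_get_entity_by_BILOU_nested_only_valid _ner_seq out) := by unfold Spec_get_entity_by_BILOU_nested_only_valid; infer_instance

-- ===== CLAIM (what is proved, stated in full; the proofs are below) =====
def Claim_equal_get_entity_by_BILOU_nested_only_valid : Prop := ∀ (_ner_seq : List String), Dom_get_entity_by_BILOU_nested_only_valid _ner_seq → Pre_get_entity_by_BILOU_nested_only_valid _ner_seq → Spec_get_entity_by_BILOU_nested_only_valid _ner_seq (get_entity_by_BILOU_nested_only_valid _ner_seq)

-- ===== LEMMAS AND PROOFS =====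

-- B's state list, read at column idy
theorem getD_pvStep (pos : Int) (parts : List (List Char)) (st : List (Option (Int × List Char))) (idy : Nat) :
    (pvStep pos parts st).getD idy none =
      (parts[idy]?).elim none (fun col =>
        if col.head? = some 'I' then
          match st.getD idy none with
          | some c => if c.2 = col.drop 2 then some c else none
          | none => none
        else if col.head? = some 'L' then some (pos + 1, col.drop 2)
        else none) := by
  simp only [List.getD, pvStep, List.getElem?_map, PySem.List.getElem?_enumerate]
  cases h : parts[idy]? <;> simp

-- the core invariant: A's forward scan from pos equals one lookup in B's precomputed state for pos
theorem pvScan_eq_resolve (t : List Char) (idy : Nat) :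
    ∀ (rest : List String) (pos : Int),
      pvScanA t idy rest pos =
        (match (pvBuild rest pos).1.getD idy none with
         | some c => if c.2 = t then some c.1 else none
         | none => none) := by
  intro rest
  induction rest with
  | nil => intro pos; simp [pvScanA, pvBuild]
  | cons r rest ih =>
    intro pos
    rw [pvScanA]
    simp only [pvBuild, getD_pvStep]
    by_cases hlen : (pvSplit r).length ≤ idy
    · have h0 : (pvSplit r)[idy]? = none := by simp [hlen]
      simp [hlen, h0]
    · push_neg at hlen
      have hget : (pvSplit r)[idy]? = some ((pvSplit r).getD idy []) := by
        simp [List.getD, List.getElem?_eq_getElem hlen]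
      simp only [hget, if_neg (not_le.mpr hlen), Option.elim]
      generalize (pvSplit r).getD idy [] = col
      by_cases hI : col.head? = some 'I'
      · simp only [hI, if_pos rfl, ih]
        cases hst : (pvBuild rest (pos + 1)).1.getD idy none with
        | none => simp
        | some c => clear ih; split_ifs <;> simp_all <;> split_ifs <;> simp_all
      · by_cases hL : col.head? = some 'L'
        · simp only [hL, if_neg hI]
          clear ih; split_ifs <;> simp_all
        · simp [hI, hL]

-- the per-tag bodies agree once the snapshot is pvBuild's state for the rows after idx
theorem pvTag_eq (full : List String) (rest : List String) (k : Nat)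
    (h : full.drop (k + 1) = rest) (acc : List (Int × Int × List Char)) (q : Int × List Char) :
    pvTagA full (k : Int) acc q = pvTagB (k : Int) ((pvBuild rest ((k : Int) + 1)).1) acc q := by
  unfold pvTagA pvTagB
  rw [pvScan_eq_resolve]
  simp only [Int.toNat_natCast, h]
  cases hst : (pvBuild rest ((k : Int) + 1)).1.getD q.1.toNat none with
  | none => simp
  | some c => by_cases hc : c.2 = q.2.drop 2 <;> split_ifs <;> simp_all

theorem pvRow_eq (full : List String) (rest : List String) (r : String) (k : Nat)
    (h : full.drop (k + 1) = rest) (acc : List (Int × Int × List Char)) :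
    pvRowA full acc ((k : Int), r) = pvRowB acc ((k : Int), (r, (pvBuild rest ((k : Int) + 1)).1)) := by
  unfold pvRowA pvRowB
  by_cases hO : r = "O"
  · simp [hO]
  · simp only [hO, if_false]
    exact PySem.List.foldl_congr_mem
      (l := PySem.List.enumerate (pvSplit r) 0) (init := acc)
      (f := pvTagA full (k : Int)) (g := pvTagB (k : Int) ((pvBuild rest ((k : Int) + 1)).1))
      (fun a x _ => pvTag_eq full rest k h a x)

-- the two entity-collecting folds agree when B folds over rows zipped with pvBuild's snapshots
theorem pvFold_eq (full : List String) :
    ∀ (tail : List String) (k : Nat) (acc : List (Int × Int × List Char)),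
      full.drop k = tail →
      (PySem.List.enumerate tail (k : Int)).foldl (pvRowA full) acc
        = (PySem.List.enumerate (tail.zip (pvBuild tail (k : Int)).2) (k : Int)).foldl pvRowB acc := by
  intro tail
  induction tail with
  | nil => intro k acc h; simp [PySem.List.enumerate_nil, pvBuild]
  | cons r rest ih =>
    intro k acc h
    have hrest : full.drop (k + 1) = rest := by
      rw [← List.tail_drop, h]; rfl
    simp only [pvBuild, List.zip_cons_cons, PySem.List.enumerate_cons, List.foldl_cons]
    rw [pvRow_eq full rest r k hrest acc]
    have hcast : (k : Int) + 1 = ((k + 1 : Nat) : Int) := by push_cast; ring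
    rw [hcast]
    exact ih (k + 1) _ hrest

-- ===== VERDICT (by name: the statement is the Claim_ definition above) =====
theorem get_entity_by_BILOU_nested_only_valid_spec : Claim_equal_get_entity_by_BILOU_nested_only_valid := by
  intro seq _ _
  unfold Spec_get_entity_by_BILOU_nested_only_valid
  unfold get_entity_by_BILOU_nested_only_valid get_entity_by_BILOU_nested_only_valid_alt
  have h := pvFold_eq seq seq 0 [] (by simp)
  simp only [Nat.cast_zero] at h
  rw [h]
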